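-- pv_equiv track=rewrite | github.com/Manar1203/CVRP_GA | ga_vrp_solver.py | split_routes
-- ===== SOURCE A (Python) =====
-- def split_routes(individual, demands, capacity):
--     routes = []
--     route = [0]
--     load = 0
--     for client in individual:
--         if load + demands[client] <= capacity:
--             route.append(client)
--             load += demands[client]
--         else:
--             route.append(0)
--             routes.append(route)
--             route = [0, client]
--             load = demands[client]
--     route.append(0)
--     routes.append(route)
--     return routes
-- ===== SOURCE B (Python) =====
-- def split_routes(individual, demands, capacity):
--     # Pass 1: compute break positions (indices where a new route must start).
--     breaks = []
--     load = 0
--     for i, client in enumerate(individual):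
--         d = demands[client]
--         if load + d > capacity:
--             breaks.append(i)
--             load = d
--         else:
--             load += d
--     # Pass 2: slice the permutation at the cut points and decorate with depots.
--     cuts = [0] + breaks + [len(individual)]
--     return [[0] + individual[a:b] + [0] for a, b in zip(cuts, cuts[1:])]
-- ===== Notes on version B (the rewrite author's own statement) =====
-- stated objective: alternative
-- what changed: Replaces A's single loop that builds routes in place with a two-phase decomposition: one pass computes the break indices from the running load, then the routes are produced by slicing the permutation at the cut points and adding the depot 0 at both ends.
import Mathlib
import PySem

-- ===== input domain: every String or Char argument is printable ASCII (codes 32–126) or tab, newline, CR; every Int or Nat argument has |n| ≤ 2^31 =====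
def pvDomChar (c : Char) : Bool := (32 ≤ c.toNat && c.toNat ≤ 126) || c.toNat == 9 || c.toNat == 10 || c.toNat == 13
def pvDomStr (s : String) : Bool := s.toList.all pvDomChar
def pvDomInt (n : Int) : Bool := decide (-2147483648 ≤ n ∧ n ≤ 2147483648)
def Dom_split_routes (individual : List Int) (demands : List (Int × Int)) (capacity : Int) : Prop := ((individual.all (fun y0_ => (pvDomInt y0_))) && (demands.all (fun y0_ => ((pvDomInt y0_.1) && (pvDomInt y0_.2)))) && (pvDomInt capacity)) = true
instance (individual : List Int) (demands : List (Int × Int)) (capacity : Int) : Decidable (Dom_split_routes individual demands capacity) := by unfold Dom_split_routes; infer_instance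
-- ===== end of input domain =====

-- B splits the work into two passes — compute break indices, then slice the permutation at the cut points — instead of A's single route-building loop (alternative decomposition, same cost).


-- ===== PORT A =====
-- demands is a Python dict; lookup demands[client] is ported as PySem.Dict.getD on the
-- association list (exact under Pre_, which guarantees the key is present).
def split_routes (individual : List Int) (demands : List (Int × Int)) (capacity : Int) : List (List Int) :=
  let st := individual.foldl
    (fun (s : List (List Int) × List Int × Int) client =>
      let d := PySem.Dict.getD ⟨demands⟩ client 0
      if s.2.2 + d ≤ capacity then (s.1, s.2.1 ++ [client], s.2.2 + d)
      else (s.1 ++ [s.2.1 ++ [0]], [0, client], d))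
    ([], [0], 0)
  st.1 ++ [st.2.1 ++ [0]]

-- ===== PORT B =====
def split_routes_alt (individual : List Int) (demands : List (Int × Int)) (capacity : Int) : List (List Int) :=
  let st := (PySem.List.enumerate individual 0).foldl
    (fun (s : List Int × Int) (p : Int × Int) =>
      let d := PySem.Dict.getD ⟨demands⟩ p.2 0
      if s.2 + d > capacity then (s.1 ++ [p.1], d) else (s.1, s.2 + d))
    ([], 0)
  let cuts : List Int := (0 :: st.1) ++ [(individual.length : Int)]
  (cuts.zip (PySem.List.slice cuts (some 1) none)).map
    (fun ab => [0] ++ PySem.List.slice individual (some ab.1) (some ab.2) ++ [0])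

-- ===== PRECONDITION & SPEC =====
-- Pre_ excludes exactly the inputs where Python A raises KeyError: some client of
-- individual is not a key of demands.
def Pre_split_routes (individual : List Int) (demands : List (Int × Int)) (capacity : Int) : Prop :=
  ∀ c ∈ individual, (PySem.Dict.mk demands).contains c = true
instance (individual : List Int) (demands : List (Int × Int)) (capacity : Int) : Decidable (Pre_split_routes individual demands capacity) := by unfold Pre_split_routes; infer_instance
def pvWitness_split_routes : List Int × (List (Int × Int)) × Int := ([1, 2, 1], [(1, 3), (2, 4)], 5)

def Spec_split_routes (individual : List Int) (demands : List (Int × Int)) (capacity : Int) (out : List (List Int)) : Prop := out = split_routes_alt individual demands capacity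
instance (individual : List Int) (demands : List (Int × Int)) (capacity : Int) (out : List (List Int)) : Decidable (Spec_split_routes individual demands capacity out) := by unfold Spec_split_routes; infer_instance

-- ===== CLAIM (what is proved, stated in full; the proofs are below) =====
def Claim_equal_split_routes : Prop := ∀ (individual : List Int) (demands : List (Int × Int)) (capacity : Int), Dom_split_routes individual demands capacity → Pre_split_routes individual demands capacity → Spec_split_routes individual demands capacity (split_routes individual demands capacity)

-- ===== LEMMAS AND PROOFS =====

-- demand of one client (shared abbreviation for the proofs)
def dOf (demands : List (Int × Int)) (c : Int) : Int := PySem.Dict.getD ⟨demands⟩ c 0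

-- reference greedy segmentation: (current segment, later segments)
def segGo (dem : List (Int × Int)) (cap : Int) : List Int → Int → List Int × List (List Int)
  | [], _ => ([], [])
  | c :: xs, load =>
    if load + dOf dem c ≤ cap then
      let r := segGo dem cap xs (load + dOf dem c)
      (c :: r.1, r.2)
    else
      let r := segGo dem cap xs (dOf dem c)
      ([], (c :: r.1) :: r.2)

-- reference break-index computation (B's first pass), k = absolute index of head
def breaksGo (dem : List (Int × Int)) (cap : Int) : List Int → Int → Nat → List Int
  | [], _, _ => []
  | c :: xs, load, k =>
    if load + dOf dem c > cap then (k : Int) :: breaksGo dem cap xs (dOf dem c) (k + 1)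
    else breaksGo dem cap xs (load + dOf dem c) (k + 1)

def sliceMap (full : List Int) (cuts : List Int) : List (List Int) :=
  (cuts.zip cuts.tail).map (fun ab => PySem.List.slice full (some ab.1) (some ab.2))

theorem lemA (dem : List (Int × Int)) (cap : Int) :
    ∀ (xs : List Int) (routes : List (List Int)) (r : List Int) (load : Int),
    (let st := xs.foldl
        (fun (s : List (List Int) × List Int × Int) client =>
          let d := PySem.Dict.getD ⟨dem⟩ client 0
          if s.2.2 + d ≤ cap then (s.1, s.2.1 ++ [client], s.2.2 + d)
          else (s.1 ++ [s.2.1 ++ [0]], [0, client], d))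
        (routes, r, load)
     st.1 ++ [st.2.1 ++ [0]])
    = routes ++ (r ++ (segGo dem cap xs load).1 ++ [0])
        :: (segGo dem cap xs load).2.map (fun s => 0 :: s ++ [0]) := by
  intro xs
  induction xs with
  | nil => intro routes r load; simp [segGo]
  | cons c xs ih =>
    intro routes r load
    simp only [List.foldl_cons, segGo, dOf]
    by_cases h : load + PySem.Dict.getD ⟨dem⟩ c 0 ≤ cap
    · simp only [if_pos h, ih]; simp
    · simp only [if_neg h, ih]; simp

theorem lemB1 (dem : List (Int × Int)) (cap : Int) :
    ∀ (xs : List Int) (k : Nat) (bs : List Int) (load : Int),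
    ((PySem.List.enumerate xs (k : Int)).foldl
      (fun (s : List Int × Int) (p : Int × Int) =>
        let d := PySem.Dict.getD ⟨dem⟩ p.2 0
        if s.2 + d > cap then (s.1 ++ [p.1], d) else (s.1, s.2 + d))
      (bs, load)).1
    = bs ++ breaksGo dem cap xs load k := by
  intro xs
  induction xs with
  | nil => intro k bs load; simp [PySem.List.enumerate_nil, breaksGo]
  | cons c xs ih =>
    intro k bs load
    rw [PySem.List.enumerate_cons]
    simp only [List.foldl_cons, breaksGo, dOf]
    by_cases h : load + PySem.Dict.getD ⟨dem⟩ c 0 > cap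
    · simp only [if_pos h]
      have : ((k : Int) + 1) = ((k + 1 : Nat) : Int) := by push_cast; ring
      rw [this, ih]; simp
    · simp only [if_neg h]
      have : ((k : Int) + 1) = ((k + 1 : Nat) : Int) := by push_cast; ring
      rw [this, ih]

theorem breaksGo_ge (dem : List (Int × Int)) (cap : Int) :
    ∀ (xs : List Int) (load : Int) (k : Nat) (b : Int),
    b ∈ breaksGo dem cap xs load k → (k : Int) ≤ b := by
  intro xs
  induction xs with
  | nil => intro load k b hb; simp [breaksGo] at hb
  | cons c xs ih =>
    intro load k b hb
    simp only [breaksGo] at hb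
    split_ifs at hb with h
    · rcases List.mem_cons.mp hb with rfl | hb
      · exact le_refl _
      · have := ih _ _ _ hb; push_cast at this ⊢; omega
    · have := ih _ _ _ hb; push_cast at this ⊢; omega

theorem sliceMap_cons (full : List Int) (a b : Int) (t : List Int) :
    sliceMap full (a :: b :: t) = PySem.List.slice full (some a) (some b) :: sliceMap full (b :: t) := rfl

theorem sliceMap_single (full : List Int) (x : Int) : sliceMap full [x] = [] := rfl

theorem slice_self (l : List Int) (k : Nat) :
    PySem.List.slice l (some (k : Int)) (some (k : Int)) = [] := by
  simp [PySem.List.slice_natCast]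

theorem sliceStep (pre : List Int) (c : Int) (xs : List Int) (h : Int)
    (hh : (pre.length : Int) + 1 ≤ h) :
    PySem.List.slice (pre ++ c :: xs) (some (pre.length : Int)) (some h)
    = c :: PySem.List.slice (pre ++ c :: xs) (some ((pre.length : Int) + 1)) (some h) := by
  have h0 : (0 : Int) ≤ (pre.length : Int) := by positivity
  have h1 : (0 : Int) ≤ h := by omega
  have h0' : (0 : Int) ≤ (pre.length : Int) + 1 := by omega
  rw [PySem.List.slice_toNat _ h0 h1, PySem.List.slice_toNat _ h0' h1]
  have e1 : ((pre.length : Int)).toNat = pre.length := Int.toNat_natCast _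
  have e2 : ((pre.length : Int) + 1).toNat = pre.length + 1 := by omega
  have hge : pre.length + 1 ≤ h.toNat := by omega
  rw [e1, e2]
  have d1 : (pre ++ c :: xs).drop pre.length = c :: xs := List.drop_left
  have d2 : (pre ++ c :: xs).drop (pre.length + 1) = xs := by
    have : pre ++ c :: xs = (pre ++ [c]) ++ xs := by simp
    rw [this]
    have : pre.length + 1 = (pre ++ [c]).length := by simp
    rw [this, List.drop_left]
  rw [d1, d2]
  have : h.toNat - pre.length = (h.toNat - (pre.length + 1)) + 1 := by omega
  rw [this, List.take_succ_cons]

theorem stepShared (dem : List (Int × Int)) (cap : Int) (xs : List Int) (load' : Int)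
    (pre : List Int) (c : Int)
    (ih : ∀ (load : Int) (k : Nat) (p : List Int), p.length = k →
      sliceMap (p ++ xs) ((k : Int) :: breaksGo dem cap xs load k ++ [(k : Int) + xs.length])
      = (segGo dem cap xs load).1 :: (segGo dem cap xs load).2) :
    sliceMap (pre ++ c :: xs)
      ((pre.length : Int) :: (breaksGo dem cap xs load' (pre.length + 1) ++ [(pre.length : Int) + (c :: xs).length]))
    = (c :: (segGo dem cap xs load').1) :: (segGo dem cap xs load').2 := by
  have hcast : ((pre.length + 1 : Nat) : Int) = (pre.length : Int) + 1 := by push_cast; ring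
  have hend : ((pre.length : Int) + ((c :: xs).length : Int))
      = (pre.length : Int) + 1 + (xs.length : Int) := by
    push_cast [List.length_cons]; ring
  rw [hend]
  have ihx := ih load' (pre.length + 1) (pre ++ [c]) (by simp)
  rw [List.append_assoc, List.singleton_append, hcast] at ihx
  cases hB : breaksGo dem cap xs load' (pre.length + 1) with
  | nil =>
    rw [hB] at ihx
    simp only [List.singleton_append, List.nil_append] at ihx ⊢
    rw [sliceMap_cons, sliceMap_single] at ihx ⊢
    have hh : (pre.length : Int) + 1 ≤ (pre.length : Int) + 1 + (xs.length : Int) := by omega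
    rw [sliceStep pre c xs _ hh]
    injection ihx with e1 e2
    rw [e1, ← e2]
  | cons b bs =>
    rw [hB] at ihx
    have hb : b ∈ breaksGo dem cap xs load' (pre.length + 1) := by
      rw [hB]; exact List.mem_cons_self
    have hh : (pre.length : Int) + 1 ≤ b := by
      have := breaksGo_ge dem cap xs load' (pre.length + 1) b hb
      push_cast at this; omega
    simp only [List.cons_append] at ihx ⊢
    rw [sliceMap_cons] at ihx ⊢
    injection ihx with e1 e2
    rw [sliceStep pre c xs b hh, e1, e2]

theorem lemB2 (dem : List (Int × Int)) (cap : Int) :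
    ∀ (xs : List Int) (load : Int) (k : Nat) (pre : List Int), pre.length = k →
    sliceMap (pre ++ xs) ((k : Int) :: breaksGo dem cap xs load k ++ [(k : Int) + xs.length])
    = (segGo dem cap xs load).1 :: (segGo dem cap xs load).2 := by
  intro xs
  induction xs with
  | nil =>
    intro load k pre hpre
    simp [breaksGo, segGo, sliceMap, PySem.List.slice_natCast]
  | cons c xs ih =>
    intro load k pre hpre
    subst hpre
    by_cases h : load + dOf dem c ≤ cap
    · rw [show breaksGo dem cap (c :: xs) load pre.length
            = breaksGo dem cap xs (load + dOf dem c) (pre.length + 1) from by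
          simp [breaksGo, not_lt.mpr h],
        show segGo dem cap (c :: xs) load
            = (c :: (segGo dem cap xs (load + dOf dem c)).1, (segGo dem cap xs (load + dOf dem c)).2) from by
          simp [segGo, h]]
      exact stepShared dem cap xs (load + dOf dem c) pre c ih
    · rw [show breaksGo dem cap (c :: xs) load pre.length
            = (pre.length : Int) :: breaksGo dem cap xs (dOf dem c) (pre.length + 1) from by
          simp [breaksGo, lt_of_not_ge h],
        show segGo dem cap (c :: xs) load
            = ([], (c :: (segGo dem cap xs (dOf dem c)).1) :: (segGo dem cap xs (dOf dem c)).2) from by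
          simp [segGo, h]]
      show sliceMap (pre ++ c :: xs)
          ((pre.length : Int) :: (pre.length : Int) :: breaksGo dem cap xs (dOf dem c) (pre.length + 1)
            ++ [(pre.length : Int) + ((c :: xs).length : Int)])
        = [] :: (c :: (segGo dem cap xs (dOf dem c)).1) :: (segGo dem cap xs (dOf dem c)).2
      simp only [List.cons_append]
      rw [sliceMap_cons, slice_self]
      rw [stepShared dem cap xs (dOf dem c) pre c ih]

-- ===== VERDICT (by name: the statement is the Claim_ definition above) =====
theorem alt_eq_sliceMap (individual : List Int) (demands : List (Int × Int)) (capacity : Int) :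
    split_routes_alt individual demands capacity
    = (sliceMap individual (((0 : Nat) : Int) :: breaksGo demands capacity individual 0 0
        ++ [((0 : Nat) : Int) + individual.length])).map (fun s => [0] ++ s ++ [0]) := by
  simp only [split_routes_alt]
  rw [show ((PySem.List.enumerate individual 0).foldl
      (fun (s : List Int × Int) (p : Int × Int) =>
        let d := PySem.Dict.getD ⟨demands⟩ p.2 0
        if s.2 + d > capacity then (s.1 ++ [p.1], d) else (s.1, s.2 + d))
      ([], 0)).1
    = [] ++ breaksGo demands capacity individual 0 0 from by
      have := lemB1 demands capacity individual 0 [] 0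
      simpa using this]
  rw [PySem.List.slice_from_one]
  simp only [List.nil_append, sliceMap, List.map_map, Nat.cast_zero, zero_add]
  rfl

theorem split_routes_spec : Claim_equal_split_routes := by
  intro individual demands capacity _ _
  unfold Spec_split_routes
  rw [alt_eq_sliceMap]
  rw [show sliceMap individual (((0 : Nat) : Int) :: breaksGo demands capacity individual 0 0
        ++ [((0 : Nat) : Int) + individual.length])
      = (segGo demands capacity individual 0).1 :: (segGo demands capacity individual 0).2 from by
    have := lemB2 demands capacity individual 0 0 [] rfl
    simpa using this]
  have hA := lemA demands capacity individual [] [0] 0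
  simp only [List.nil_append] at hA
  rw [show split_routes individual demands capacity
      = ([0] ++ (segGo demands capacity individual 0).1 ++ [0])
        :: (segGo demands capacity individual 0).2.map (fun s => 0 :: s ++ [0]) from hA]
  simp
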